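-- pv_equiv track=rewrite | github.com/sheikhsufyan89/dsa_project | main.py | search_recursive
-- ===== SOURCE A (Python) =====
-- def search_recursive(heap, index,value,output):
--     if index >= len(heap):
--         return False
--
--     left_child_index = 2 * index + 1
--     right_child_index = 2 * index + 2
--
--     if int(heap[index][2]) == value:
--         output.append((heap[index],index))
--         return True
--
--     left_child_index = 2 * index + 1
--     right_child_index = 2 * index + 2
--
--     return search_recursive(heap, left_child_index,value,output) or search_recursive(heap, right_child_index,value,output)
-- ===== SOURCE B (Python) =====
-- def search_recursive(heap, index, value, output):
--     stack = [index]
--     while stack: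
--         i = stack.pop()
--         if i >= len(heap):
--             continue
--         if int(heap[i][2]) == value:
--             output.append((heap[i], i))
--             return True
--         stack.append(2 * i + 2)
--         stack.append(2 * i + 1)
--     return False
-- ===== Notes on version B (the rewrite author's own statement) =====
-- stated objective: alternative
-- what changed: The recursive preorder DFS is replaced by an iterative loop over an explicit stack (children pushed right-before-left), removing recursion entirely.
-- outside the precondition, e.g. on search_recursive([('a', 'b', '1'), ('c', 'd', 'x')], 0, 1, []): A returns True, B returns True; on search_recursive([('a', 'b', '1')], -1, 1, []): A returns True, B returns True; on search_recursive([('a', 'b', 'x')], 0, 1, []): A raises ValueError, B raises ValueError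
import Mathlib
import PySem

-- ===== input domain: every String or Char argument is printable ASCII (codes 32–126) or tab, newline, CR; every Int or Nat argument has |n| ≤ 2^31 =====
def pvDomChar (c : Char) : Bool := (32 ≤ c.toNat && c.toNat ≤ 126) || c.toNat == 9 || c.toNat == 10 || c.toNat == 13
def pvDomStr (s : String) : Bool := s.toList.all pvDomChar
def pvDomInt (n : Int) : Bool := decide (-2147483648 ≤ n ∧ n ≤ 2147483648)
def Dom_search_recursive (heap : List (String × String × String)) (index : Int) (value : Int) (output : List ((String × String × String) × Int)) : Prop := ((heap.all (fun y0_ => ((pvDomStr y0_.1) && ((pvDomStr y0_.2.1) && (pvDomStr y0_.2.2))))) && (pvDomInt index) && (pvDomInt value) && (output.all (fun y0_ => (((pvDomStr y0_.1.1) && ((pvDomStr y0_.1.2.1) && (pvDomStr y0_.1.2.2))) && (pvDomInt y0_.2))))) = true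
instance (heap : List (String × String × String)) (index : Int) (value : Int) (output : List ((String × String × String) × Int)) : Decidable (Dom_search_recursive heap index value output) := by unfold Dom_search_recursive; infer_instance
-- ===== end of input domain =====

-- B replaces the recursion by an explicit-stack loop; like A it also appends the found node to `output` (same node), the theorems are about the return value.
-- ===== PORT A =====
-- termination helper for Port A (cited by its decreasing_by)
theorem pvChildA_lt (n i : Nat) (h : i < n) : n - (2 * i + 1) < n - i := by omega

def searchAuxA (heap : List (String × String × String)) (value : Int) (i : Nat) : Bool :=
  if h : heap.length ≤ i then false
  else
    match PySem.Int.ofStr? (heap[i]'(by omega)).2.2 with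
    | none => false      -- Python raises ValueError here (excluded by Pre_)
    | some k =>
      if k = value then true
      else searchAuxA heap value (2 * i + 1) || searchAuxA heap value (2 * i + 2)
termination_by heap.length - i
decreasing_by
  · exact pvChildA_lt _ _ (by omega)
  · omega

def search_recursive (heap : List (String × String × String)) (index : Int) (value : Int) (output : List ((String × String × String) × Int)) : Bool :=
  if (heap.length : Int) ≤ index then false
  else if index < 0 then false   -- totality guard: Python wraps/raises via negative indexing here (excluded by Pre_)
  else searchAuxA heap value index.toNat

-- ===== PORT B =====
-- potential function used only for B's termination measure
def pvPot (n : Nat) (i : Int) : Nat :=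
  if 0 ≤ i ∧ i < (n : Int) then 3 ^ (n - i.toNat) else 1

theorem pvPot_pos (n : Nat) (i : Int) : 0 < pvPot n i := by
  unfold pvPot; split
  · positivity
  · norm_num

theorem pvPot_child_le (n : Nat) (i c : Int) (h0 : 0 ≤ i) (h1 : i < (n : Int)) (hc : i < c) :
    pvPot n c ≤ 3 ^ (n - i.toNat - 1) := by
  unfold pvPot; split
  · exact Nat.pow_le_pow_right (by norm_num) (by omega)
  · exact Nat.one_le_pow _ _ (by norm_num)

theorem pvPot_push_lt (n : Nat) (i : Int) (h0 : 0 ≤ i) (h1 : i < (n : Int)) :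
    pvPot n (2 * i + 1) + pvPot n (2 * i + 2) < pvPot n i := by
  have hl := pvPot_child_le n i (2 * i + 1) h0 h1 (by omega)
  have hr := pvPot_child_le n i (2 * i + 2) h0 h1 (by omega)
  have hone : 1 ≤ 3 ^ (n - i.toNat - 1) := Nat.one_le_pow _ _ (by norm_num)
  have hi : pvPot n i = 3 * 3 ^ (n - i.toNat - 1) := by
    have he : n - i.toNat = (n - i.toNat - 1) + 1 := by omega
    unfold pvPot
    rw [if_pos ⟨h0, h1⟩]
    conv_lhs => rw [he]
    rw [pow_succ, Nat.mul_comm]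
  rw [hi]; omega

def loopB (heap : List (String × String × String)) (value : Int) : List Int → Bool
  | [] => false
  | i :: st =>
    if h1 : (heap.length : Int) ≤ i then loopB heap value st
    else if h2 : i < 0 then loopB heap value st   -- totality guard: Python would wrap here (excluded by Pre_)
    else
      match PySem.Int.ofStr? (heap[i.toNat]'(by omega)).2.2 with
      | none => false    -- Python raises ValueError here (excluded by Pre_)
      | some k =>
        if k = value then true
        else loopB heap value ((2 * i + 1) :: (2 * i + 2) :: st)
termination_by st => (st.map (pvPot heap.length)).sum
decreasing_by
  · simp only [List.map_cons, List.sum_cons]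
    have := pvPot_pos heap.length i; omega
  · simp only [List.map_cons, List.sum_cons]
    have := pvPot_pos heap.length i; omega
  · simp only [List.map_cons, List.sum_cons]
    have := pvPot_push_lt heap.length i (by omega) (by omega)
    omega

def search_recursive_alt (heap : List (String × String × String)) (index : Int) (value : Int) (output : List ((String × String × String) × Int)) : Bool :=
  loopB heap value [index]

-- ===== PRECONDITION & SPEC =====
-- Pre_ excludes negative start indices (A mostly hits RecursionError/IndexError there, and any value it does
-- return comes from Python's accidental negative-index wraparound) and heaps containing a key string that is
-- not int()-parseable when index is in range (A raises ValueError on the first such node it visits; this also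
-- excludes the few inputs where A happens to find a match before reaching the bad string).
def Pre_search_recursive (heap : List (String × String × String)) (index : Int) (value : Int) (output : List ((String × String × String) × Int)) : Prop :=
  0 ≤ index ∧ ((heap.length : Int) ≤ index ∨ heap.all (fun t => (PySem.Int.ofStr? t.2.2).isSome) = true)
instance (heap : List (String × String × String)) (index : Int) (value : Int) (output : List ((String × String × String) × Int)) : Decidable (Pre_search_recursive heap index value output) := by unfold Pre_search_recursive; infer_instance

def pvWitness_search_recursive : (List (String × String × String)) × Int × Int × (List ((String × String × String) × Int)) :=
  ([("a", "b", "1"), ("c", "d", "2")], 0, 2, [])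

def Spec_search_recursive (heap : List (String × String × String)) (index : Int) (value : Int) (output : List ((String × String × String) × Int)) (out : Bool) : Prop := out = search_recursive_alt heap index value output
instance (heap : List (String × String × String)) (index : Int) (value : Int) (output : List ((String × String × String) × Int)) (out : Bool) : Decidable (Spec_search_recursive heap index value output out) := by unfold Spec_search_recursive; infer_instance

-- ===== CLAIM (what is proved, stated in full; the proofs are below) =====
def Claim_equal_search_recursive : Prop := ∀ (heap : List (String × String × String)) (index : Int) (value : Int) (output : List ((String × String × String) × Int)), Dom_search_recursive heap index value output → Pre_search_recursive heap index value output → Spec_search_recursive heap index value output (search_recursive heap index value output)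

-- ===== LEMMAS AND PROOFS =====

-- A's value seen from one stack entry: negative entries contribute false, others run A's recursion.
def pvAOf (heap : List (String × String × String)) (value : Int) (i : Int) : Bool :=
  if i < 0 then false else searchAuxA heap value i.toNat

theorem pvLoop_cons (heap : List (String × String × String)) (value : Int)
    (hp : heap.all (fun t => (PySem.Int.ofStr? t.2.2).isSome) = true) :
    ∀ (N : Nat) (i : Int) (st : List Int),
      ((i :: st).map (pvPot heap.length)).sum ≤ N →
      loopB heap value (i :: st) = (pvAOf heap value i || loopB heap value st) := by
  intro N
  induction N with
  | zero =>
    intro i st hN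
    exfalso
    have := pvPot_pos heap.length i
    simp only [List.map_cons, List.sum_cons] at hN
    omega
  | succ N ih =>
    intro i st hN
    rw [loopB]
    by_cases h1 : (heap.length : Int) ≤ i
    · simp only [dif_pos h1]
      have : pvAOf heap value i = false := by
        unfold pvAOf
        split
        · rfl
        · rw [searchAuxA]; rw [dif_pos (by omega)]
      rw [this, Bool.false_or]
    · simp only [dif_neg h1]
      by_cases h2 : i < 0
      · simp only [dif_pos h2]
        unfold pvAOf; rw [if_pos h2, Bool.false_or]
      · simp only [dif_neg h2]
        have hlt : i.toNat < heap.length := by omega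
        have hA : pvAOf heap value i = searchAuxA heap value i.toNat := by
          unfold pvAOf; rw [if_neg h2]
        have hsome : (PySem.Int.ofStr? (heap[i.toNat]'hlt).2.2).isSome := by
          have hmem : heap[i.toNat]'hlt ∈ heap := List.getElem_mem hlt
          exact (List.all_eq_true.mp hp) _ hmem
        rw [hA, searchAuxA, dif_neg (by omega : ¬ heap.length ≤ i.toNat)]
        cases hk : PySem.Int.ofStr? (heap[i.toNat]'hlt).2.2 with
        | none => rw [hk] at hsome; simp at hsome
        | some k =>
          by_cases hv : k = value
          · simp [hv]
          · simp only [if_neg hv]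
            have hm : ((i :: st).map (pvPot heap.length)).sum ≤ N + 1 := hN
            have hdec := pvPot_push_lt heap.length i (by omega) (by omega)
            have hN1 : (((2 * i + 1) :: (2 * i + 2) :: st).map (pvPot heap.length)).sum ≤ N := by
              simp only [List.map_cons, List.sum_cons] at hm ⊢
              have hpi : pvPot heap.length i = 3 ^ (heap.length - i.toNat) := by
                unfold pvPot; rw [if_pos ⟨by omega, by omega⟩]
              omega
            have hN2 : (((2 * i + 2) :: st).map (pvPot heap.length)).sum ≤ N := by
              simp only [List.map_cons, List.sum_cons] at hN1 ⊢
              have := pvPot_pos heap.length (2 * i + 1)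
              omega
            rw [ih _ _ hN1, ih _ _ hN2]
            have hl : pvAOf heap value (2 * i + 1) = searchAuxA heap value (2 * i.toNat + 1) := by
              unfold pvAOf
              rw [if_neg (by omega : ¬ (2 * i + 1 < 0)), show (2 * i + 1).toNat = 2 * i.toNat + 1 from by omega]
            have hr : pvAOf heap value (2 * i + 2) = searchAuxA heap value (2 * i.toNat + 2) := by
              unfold pvAOf
              rw [if_neg (by omega : ¬ (2 * i + 2 < 0)), show (2 * i + 2).toNat = 2 * i.toNat + 2 from by omega]
            rw [hl, hr, Bool.or_assoc]

-- ===== VERDICT (by name: the statement is the Claim_ definition above) =====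
theorem search_recursive_spec : Claim_equal_search_recursive := by
  intro heap index value output _ hpre
  obtain ⟨h0, hcase⟩ := hpre
  unfold Spec_search_recursive search_recursive search_recursive_alt
  rcases hcase with hbig | hp
  · rw [if_pos hbig, loopB, dif_pos hbig, loopB]
  · have := pvLoop_cons heap value hp (([index].map (pvPot heap.length)).sum) index [] le_rfl
    rw [this, loopB, Bool.or_false]
    unfold pvAOf
    rw [if_neg (by omega : ¬ index < 0)]
    by_cases hbig : (heap.length : Int) ≤ index
    · rw [if_pos hbig, searchAuxA, dif_pos (by omega)]
    · rw [if_neg hbig]
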